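-- pv_equiv track=rewrite | github.com/dataeducator/fairswarm-library | src/fairswarm/types.py | validate_coalition
-- ===== SOURCE A (Python) =====
-- from typing import List, NewType, Sequence, Union
--
-- Coalition = List[int]
--
-- def validate_coalition(
--     coalition: Coalition,
--     n_clients: int,
-- ) -> bool:
--     """
--     Validate that a coalition contains valid, unique client indices.
--
--     Args:
--         coalition: List of client indices
--         n_clients: Total number of clients
--
--     Returns:
--         True if valid, False otherwise
--
--     Example:
--         >>> validate_coalition([0, 2, 5], n_clients=10)
--         True
--         >>> validate_coalition([0, 2, 15], n_clients=10)  # 15 out of range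
--         False
--         >>> validate_coalition([0, 2, 2], n_clients=10)  # duplicate
--         False
--     """
--     if len(coalition) != len(set(coalition)):
--         return False  # Duplicates
--     if any(idx < 0 or idx >= n_clients for idx in coalition):
--         return False  # Out of range
--     return True
-- ===== SOURCE B (Python) =====
-- def validate_coalition(coalition, n_clients):
--     s = sorted(coalition)
--     for a, b in zip(s, s[1:]):
--         if a == b:
--             return False  # duplicate shows up adjacent after sorting
--     return not s or (s[0] >= 0 and s[-1] < n_clients)
-- ===== Notes on version B (the rewrite author's own statement) =====
-- stated objective: alternative
-- what changed: Replaced A's hash-set cardinality test plus full range scan by sort-then-scan: sort the coalition, detect duplicates as adjacent equal elements, and check the range using only the minimum (first) and maximum (last) of the sorted list.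
import Mathlib
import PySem

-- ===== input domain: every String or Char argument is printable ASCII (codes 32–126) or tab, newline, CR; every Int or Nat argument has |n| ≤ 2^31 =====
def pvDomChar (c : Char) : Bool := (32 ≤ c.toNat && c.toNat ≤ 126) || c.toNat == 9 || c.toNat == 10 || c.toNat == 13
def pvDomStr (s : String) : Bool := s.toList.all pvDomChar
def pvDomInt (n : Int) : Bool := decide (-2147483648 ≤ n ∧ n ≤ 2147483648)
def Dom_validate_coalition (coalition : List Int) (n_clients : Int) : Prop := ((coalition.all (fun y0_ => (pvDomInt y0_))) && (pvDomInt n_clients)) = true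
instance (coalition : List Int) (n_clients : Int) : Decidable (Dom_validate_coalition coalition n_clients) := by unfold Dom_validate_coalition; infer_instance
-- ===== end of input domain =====

-- B replaces A's set-cardinality + full range scan by sort-then-scan: duplicates are adjacent after
-- sorting, and the range is checked on the sorted list's first and last element only (alternative algorithm).

-- ===== PORT A =====
def validate_coalition (coalition : List Int) (n_clients : Int) : Bool :=
  if coalition.length ≠ (PySem.Set.ofList coalition).length then false
  else if coalition.any (fun idx => decide (idx < 0) || decide (n_clients ≤ idx)) then false
  else true

-- ===== PORT B =====
-- the 'for a, b in zip(s, s[1:])' loop: true iff no adjacent pair is equal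
def vc_adjDistinct : List Int → Bool
  | a :: b :: rest => if a == b then false else vc_adjDistinct (b :: rest)
  | _ => true

-- the part of B after 's = sorted(coalition)': duplicate scan, then bounds on s[0] and s[-1]
def vc_check (s : List Int) (n_clients : Int) : Bool :=
  if vc_adjDistinct s = false then false
  else
    match s with
    | [] => true
    | x :: rest => decide (0 ≤ x) && decide ((x :: rest).getLast (List.cons_ne_nil _ _) < n_clients)

def validate_coalition_alt (coalition : List Int) (n_clients : Int) : Bool :=
  vc_check (PySem.List.sorted coalition (fun x => x)) n_clients

-- ===== PRECONDITION & SPEC =====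
def Spec_validate_coalition (coalition : List Int) (n_clients : Int) (out : Bool) : Prop := out = validate_coalition_alt coalition n_clients
instance (coalition : List Int) (n_clients : Int) (out : Bool) : Decidable (Spec_validate_coalition coalition n_clients out) := by unfold Spec_validate_coalition; infer_instance

-- ===== CLAIM =====
def Claim_equal_validate_coalition : Prop := ∀ (coalition : List Int) (n_clients : Int), Dom_validate_coalition coalition n_clients → Spec_validate_coalition coalition n_clients (validate_coalition coalition n_clients)

-- ===== LEMMAS AND PROOFS =====

-- length of a foldl of Set.add is bounded by start length + number of elements added
theorem pv_foldl_add_len_le (xs : List Int) : ∀ (s : PySem.Set Int),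
    (xs.foldl PySem.Set.add s).length ≤ s.length + xs.length := by
  induction xs with
  | nil => intro s; simp
  | cons x xs ih =>
    intro s
    simp only [List.foldl_cons, List.length_cons]
    have h := ih (PySem.Set.add s x)
    have : (PySem.Set.add s x).length ≤ s.length + 1 := by
      unfold PySem.Set.add
      split <;> simp
    omega

-- the foldl reaches full length iff the elements are fresh and pairwise distinct
theorem pv_foldl_add_len_eq (xs : List Int) : ∀ (s : PySem.Set Int),
    ((xs.foldl PySem.Set.add s).length = s.length + xs.length ↔
      xs.Nodup ∧ ∀ x ∈ xs, x ∉ s) := by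
  induction xs with
  | nil => intro s; simp
  | cons x xs ih =>
    intro s
    simp only [List.foldl_cons, List.nodup_cons, List.mem_cons, List.length_cons]
    by_cases hc : x ∈ s
    · have hadd : PySem.Set.add s x = s := by
        unfold PySem.Set.add
        simp only [PySem.Set.contains_eq_listContains]
        simp [hc]
      rw [hadd]
      have hle := pv_foldl_add_len_le xs s
      constructor
      · intro h; omega
      · rintro ⟨-, hall⟩
        exact absurd hc (hall x (Or.inl rfl))
    · have hcf : PySem.Set.contains s x = false := by
        by_contra h
        exact hc ((PySem.Set.contains_iff s x).1 (by simpa using h))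
      have hadd : PySem.Set.add s x = s ++ [x] := by
        unfold PySem.Set.add
        rw [hcf]
        simp
      rw [hadd]
      rw [show s.length + (xs.length + 1) = (s ++ [x]).length + xs.length by simp; omega]
      rw [ih]
      simp only [List.mem_append, List.mem_singleton]
      constructor
      · rintro ⟨hnd, hall⟩
        refine ⟨⟨fun hx => (hall x hx) (Or.inr rfl), hnd⟩, ?_⟩
        rintro y (rfl | hy)
        · exact hc
        · exact fun hys => (hall y hy) (Or.inl hys)
      · rintro ⟨⟨hxnot, hnd⟩, hall⟩
        refine ⟨hnd, fun y hy => ?_⟩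
        rintro (hys | rfl)
        · exact hall y (Or.inr hy) hys
        · exact hxnot hy

-- characterization of A
theorem pv_A_iff (c : List Int) (n : Int) :
    validate_coalition c n = true ↔ c.Nodup ∧ ∀ x ∈ c, 0 ≤ x ∧ x < n := by
  unfold validate_coalition
  have hof : PySem.Set.ofList c = c.foldl PySem.Set.add [] := PySem.Set.ofList_eq_foldl c
  have hiff := pv_foldl_add_len_eq c []
  rw [← hof] at hiff
  simp only [List.length_nil, Nat.zero_add] at hiff
  constructor
  · intro h
    split_ifs at h with h1 h2
    have hnd : c.Nodup := (hiff.1 (by omega)).1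
    refine ⟨hnd, fun x hx => ?_⟩
    simp only [List.any_eq_true, not_exists] at h2
    push Not at h2
    have := h2 x hx
    simp at this
    omega
  · rintro ⟨hnd, hall⟩
    have hlen : c.length = (PySem.Set.ofList c).length := (hiff.2 ⟨hnd, by simp⟩).symm
    rw [if_neg (by omega)]
    rw [if_neg]
    simp only [List.any_eq_true]
    rintro ⟨x, hx, hb⟩
    have := hall x hx
    simp at hb
    omega

-- adjacent-distinct scan computes IsChain (· ≠ ·)
theorem pv_adjDistinct_iff : ∀ (s : List Int), vc_adjDistinct s = true ↔ s.IsChain (· ≠ ·)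
  | [] => by simp [vc_adjDistinct]
  | [a] => by simp [vc_adjDistinct]
  | a :: b :: rest => by
    rw [vc_adjDistinct]
    by_cases hab : a = b
    · simp [hab]
    · rw [if_neg (by simpa using hab)]
      rw [pv_adjDistinct_iff (b :: rest)]
      simp [List.isChain_cons_cons, hab]

-- under Pairwise ≤, adjacent-distinct is Nodup
theorem pv_chain_ne_nodup (s : List Int) (hs : s.Pairwise (· ≤ ·)) :
    s.IsChain (· ≠ ·) ↔ s.Nodup := by
  constructor
  · intro h
    have hlt : s.IsChain (· < ·) := by
      induction s with
      | nil => simp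
      | cons a t ih =>
        cases t with
        | nil => simp
        | cons b u =>
          rw [List.isChain_cons_cons] at h ⊢
          rw [List.pairwise_cons] at hs
          exact ⟨lt_of_le_of_ne (hs.1 b (by simp)) h.1, ih hs.2 h.2⟩
    exact (List.isChain_iff_pairwise.1 hlt).imp (fun h => ne_of_lt h)
  · intro h
    exact List.Pairwise.isChain h

-- under Pairwise ≤, every element is ≤ the last
theorem pv_le_getLast : ∀ (s : List Int) (h : s ≠ []), s.Pairwise (· ≤ ·) →
    ∀ y ∈ s, y ≤ s.getLast h
  | [], h, _ => absurd rfl h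
  | [a], _, _ => by simp
  | a :: b :: rest, _, hp => by
    intro y hy
    rw [List.pairwise_cons] at hp
    rw [List.getLast_cons (List.cons_ne_nil _ _)]
    rcases List.mem_cons.1 hy with rfl | hy
    · calc y ≤ b := hp.1 b (by simp)
        _ ≤ (b :: rest).getLast (List.cons_ne_nil _ _) :=
          pv_le_getLast (b :: rest) (List.cons_ne_nil _ _) hp.2 b (by simp)
    · exact pv_le_getLast (b :: rest) (List.cons_ne_nil _ _) hp.2 y hy

-- characterization of the scan on any ≤-sorted list
theorem pv_check_iff (s : List Int) (n : Int) (hpw : s.Pairwise (· ≤ ·)) :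
    vc_check s n = true ↔ s.Nodup ∧ ∀ y ∈ s, 0 ≤ y ∧ y < n := by
  unfold vc_check
  by_cases hadj : vc_adjDistinct s = true
  · rw [if_neg (by simp [hadj])]
    have hsnd : s.Nodup := (pv_chain_ne_nodup s hpw).1 ((pv_adjDistinct_iff s).1 hadj)
    cases s with
    | nil => simp
    | cons x rest =>
      simp only [Bool.and_eq_true, decide_eq_true_eq]
      constructor
      · rintro ⟨h0, hl⟩
        refine ⟨hsnd, fun y hy => ?_⟩
        have hxy : x ≤ y := by
          rcases List.mem_cons.1 hy with rfl | hy
          · exact le_refl y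
          · exact (List.pairwise_cons.1 hpw).1 y hy
        refine ⟨le_trans h0 hxy, ?_⟩
        calc y ≤ (x :: rest).getLast (List.cons_ne_nil _ _) :=
              pv_le_getLast _ (List.cons_ne_nil _ _) hpw y hy
          _ < n := hl
      · rintro ⟨-, hall⟩
        refine ⟨(hall x (by simp)).1, ?_⟩
        exact (hall _ (List.getLast_mem _)).2
  · rw [if_pos (by simpa using hadj)]
    simp only [Bool.false_eq_true, false_iff, not_and]
    intro hnd _
    exact hadj ((pv_adjDistinct_iff s).2 ((pv_chain_ne_nodup s hpw).2 hnd))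

-- characterization of B
theorem pv_B_iff (c : List Int) (n : Int) :
    validate_coalition_alt c n = true ↔ c.Nodup ∧ ∀ x ∈ c, 0 ≤ x ∧ x < n := by
  unfold validate_coalition_alt
  have hperm : (PySem.List.sorted c (fun x => x)).Perm c :=
    PySem.List.sorted_perm c (fun x => x) false
  have hpw : (PySem.List.sorted c (fun x => x)).Pairwise (· ≤ ·) := by
    simpa using PySem.List.sorted_pairwise c (fun x => x)
  rw [pv_check_iff _ n hpw, hperm.nodup_iff]
  constructor
  · rintro ⟨hnd, hall⟩
    exact ⟨hnd, fun y hy => hall y (hperm.mem_iff.2 hy)⟩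
  · rintro ⟨hnd, hall⟩
    exact ⟨hnd, fun y hy => hall y (hperm.mem_iff.1 hy)⟩

-- ===== VERDICT =====
theorem validate_coalition_spec : Claim_equal_validate_coalition := by
  intro c n _
  unfold Spec_validate_coalition
  have hA := pv_A_iff c n
  have hB := pv_B_iff c n
  cases hca : validate_coalition c n
  · cases hcb : validate_coalition_alt c n
    · rfl
    · exact absurd (hA.2 (hB.1 hcb)) (by simp [hca])
  · exact (hB.2 (hA.1 hca)).symm
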